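-- pv_equiv track=rewrite | github.com/coder5617/Email-Header-AnalyzerV2 | src/email_header_analyzer/core/enhanced_routing.py | _generate_routing_recommendations
-- ===== SOURCE A (Python) =====
-- from typing import Any, Dict, List, Optional
--
-- def _generate_routing_recommendations(issues: List[str],
--                                     suspicious_hops: List[Dict[str, Any]]) -> List[str]:
--     """Generate routing-related recommendations"""
--     recommendations = []
--
--     if suspicious_hops:
--         recommendations.append("Investigate suspicious routing hops for potential threats")
--
--     if any("excessive" in issue.lower() or "high number" in issue.lower() for issue in issues):
--         recommendations.append("Review email routing configuration to reduce hop count")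
--
--     if any("timestamp" in issue.lower() for issue in issues):
--         recommendations.append("Verify server time synchronization in email infrastructure")
--
--     if any("missing" in issue.lower() for issue in issues):
--         recommendations.append("Ensure all mail servers properly log routing information")
--
--     if any("loop" in issue.lower() for issue in issues):
--         recommendations.append("Check mail routing configuration for loops")
--
--     if any("private ip" in issue.lower() for issue in issues):
--         recommendations.append("Review use of private IPs in external email routing")
--
--     return recommendations
-- ===== SOURCE B (Python) =====
-- from typing import Any, Dict, List
--
-- def _generate_routing_recommendations(issues: List[str],
--                                     suspicious_hops: List[Dict[str, Any]]) -> List[str]: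
--     """Single pass over issues recording keyword-category flags, then emit in fixed order."""
--     hop_count = timestamp = missing = loop = private_ip = False
--     for issue in issues:
--         low = issue.lower()
--         if "excessive" in low or "high number" in low:
--             hop_count = True
--         if "timestamp" in low:
--             timestamp = True
--         if "missing" in low:
--             missing = True
--         if "loop" in low:
--             loop = True
--         if "private ip" in low:
--             private_ip = True
--     out = []
--     if suspicious_hops:
--         out.append("Investigate suspicious routing hops for potential threats")
--     if hop_count:
--         out.append("Review email routing configuration to reduce hop count")
--     if timestamp:
--         out.append("Verify server time synchronization in email infrastructure")
--     if missing:
--         out.append("Ensure all mail servers properly log routing information")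
--     if loop:
--         out.append("Check mail routing configuration for loops")
--     if private_ip:
--         out.append("Review use of private IPs in external email routing")
--     return out
-- ===== Notes on version B (the rewrite author's own statement) =====
-- stated objective: simpler
-- what changed: B lowercases each issue once in a single pass that sets five category flags, then emits the recommendations in fixed order after the loop, instead of A's five separate any(...) scans each re-lowercasing every issue.
import Mathlib
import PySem

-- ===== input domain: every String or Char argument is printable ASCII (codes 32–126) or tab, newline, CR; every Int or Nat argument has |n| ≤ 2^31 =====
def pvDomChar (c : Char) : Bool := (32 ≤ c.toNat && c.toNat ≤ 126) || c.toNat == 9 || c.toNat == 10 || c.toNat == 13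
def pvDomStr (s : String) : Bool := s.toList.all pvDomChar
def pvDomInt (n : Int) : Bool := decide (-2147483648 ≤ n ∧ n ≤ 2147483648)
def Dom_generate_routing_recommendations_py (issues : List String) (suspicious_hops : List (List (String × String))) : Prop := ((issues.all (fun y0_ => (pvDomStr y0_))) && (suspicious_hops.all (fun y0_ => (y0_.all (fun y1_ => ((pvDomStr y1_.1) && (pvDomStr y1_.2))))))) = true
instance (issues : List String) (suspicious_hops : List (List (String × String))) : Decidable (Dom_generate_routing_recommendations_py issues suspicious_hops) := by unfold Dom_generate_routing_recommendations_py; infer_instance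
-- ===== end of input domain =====

-- B replaces A's five separate any(...) scans (each re-lowercasing every issue) by one
-- flag-collecting pass followed by a fixed-order emit pass (objective: simpler).

-- ===== PORT A =====
-- literal transliteration of A: conditional appends to `recommendations`, each condition a fresh any(...) scan
def generate_routing_recommendations_py (issues : List String) (suspicious_hops : List (List (String × String))) : List String :=
  let recommendations : List String := []
  let recommendations := if !suspicious_hops.isEmpty then
      recommendations ++ ["Investigate suspicious routing hops for potential threats"] else recommendations
  let recommendations := if issues.any (fun issue =>
        PySem.Str.isIn "excessive" (PySem.Str.lower issue) || PySem.Str.isIn "high number" (PySem.Str.lower issue)) then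
      recommendations ++ ["Review email routing configuration to reduce hop count"] else recommendations
  let recommendations := if issues.any (fun issue => PySem.Str.isIn "timestamp" (PySem.Str.lower issue)) then
      recommendations ++ ["Verify server time synchronization in email infrastructure"] else recommendations
  let recommendations := if issues.any (fun issue => PySem.Str.isIn "missing" (PySem.Str.lower issue)) then
      recommendations ++ ["Ensure all mail servers properly log routing information"] else recommendations
  let recommendations := if issues.any (fun issue => PySem.Str.isIn "loop" (PySem.Str.lower issue)) then
      recommendations ++ ["Check mail routing configuration for loops"] else recommendations
  let recommendations := if issues.any (fun issue => PySem.Str.isIn "private ip" (PySem.Str.lower issue)) then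
      recommendations ++ ["Review use of private IPs in external email routing"] else recommendations
  recommendations

-- ===== PORT B =====
-- single pass: five boolean flags accumulated over issues, lowercasing each issue once
def pvFlagsStep (f : Bool × Bool × Bool × Bool × Bool) (issue : String) : Bool × Bool × Bool × Bool × Bool :=
  let low := PySem.Str.lower issue
  (f.1 || (PySem.Str.isIn "excessive" low || PySem.Str.isIn "high number" low),
   f.2.1 || PySem.Str.isIn "timestamp" low,
   f.2.2.1 || PySem.Str.isIn "missing" low,
   f.2.2.2.1 || PySem.Str.isIn "loop" low,
   f.2.2.2.2 || PySem.Str.isIn "private ip" low)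

def generate_routing_recommendations_py_alt (issues : List String) (suspicious_hops : List (List (String × String))) : List String :=
  let flags := issues.foldl pvFlagsStep (false, false, false, false, false)
  (if !suspicious_hops.isEmpty then ["Investigate suspicious routing hops for potential threats"] else []) ++
  (if flags.1 then ["Review email routing configuration to reduce hop count"] else []) ++
  (if flags.2.1 then ["Verify server time synchronization in email infrastructure"] else []) ++
  (if flags.2.2.1 then ["Ensure all mail servers properly log routing information"] else []) ++
  (if flags.2.2.2.1 then ["Check mail routing configuration for loops"] else []) ++
  (if flags.2.2.2.2 then ["Review use of private IPs in external email routing"] else [])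

-- ===== PRECONDITION & SPEC =====
def Spec_generate_routing_recommendations_py (issues : List String) (suspicious_hops : List (List (String × String))) (out : List String) : Prop := out = generate_routing_recommendations_py_alt issues suspicious_hops
instance (issues : List String) (suspicious_hops : List (List (String × String))) (out : List String) : Decidable (Spec_generate_routing_recommendations_py issues suspicious_hops out) := by unfold Spec_generate_routing_recommendations_py; infer_instance

-- ===== CLAIM (what is proved, stated in full; the proofs are below) =====
def Claim_equal_generate_routing_recommendations_py : Prop := ∀ (issues : List String) (suspicious_hops : List (List (String × String))), Dom_generate_routing_recommendations_py issues suspicious_hops → Spec_generate_routing_recommendations_py issues suspicious_hops (generate_routing_recommendations_py issues suspicious_hops)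

-- ===== LEMMAS AND PROOFS =====

-- the accumulated flags are exactly the five any(...) tests, or-ed with the seed
theorem pvFlags_spec (issues : List String) (f : Bool × Bool × Bool × Bool × Bool) :
    issues.foldl pvFlagsStep f =
      (f.1 || issues.any (fun issue =>
          PySem.Str.isIn "excessive" (PySem.Str.lower issue) || PySem.Str.isIn "high number" (PySem.Str.lower issue)),
       f.2.1 || issues.any (fun issue => PySem.Str.isIn "timestamp" (PySem.Str.lower issue)),
       f.2.2.1 || issues.any (fun issue => PySem.Str.isIn "missing" (PySem.Str.lower issue)),
       f.2.2.2.1 || issues.any (fun issue => PySem.Str.isIn "loop" (PySem.Str.lower issue)),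
       f.2.2.2.2 || issues.any (fun issue => PySem.Str.isIn "private ip" (PySem.Str.lower issue))) := by
  induction issues generalizing f with
  | nil => simp
  | cons x xs ih =>
    simp only [List.foldl_cons, ih, List.any_cons, pvFlagsStep]
    simp [Bool.or_assoc]

-- ===== VERDICT (by name: the statement is the Claim_ definition above) =====
theorem generate_routing_recommendations_py_spec : Claim_equal_generate_routing_recommendations_py := by
  intro issues suspicious_hops _
  unfold Spec_generate_routing_recommendations_py generate_routing_recommendations_py generate_routing_recommendations_py_alt
  simp only [pvFlags_spec, Bool.false_or]
  split_ifs <;> simp_all
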